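-- pv_equiv track=rewrite | github.com/novyne/fibonnaci | fibonnaci/matrix.py | summative_steps_to_n
-- ===== SOURCE A (Python) =====
-- def summative_steps_to_n(n: int) -> list[int]:
--     """
--     Determine the summative (calculative only) steps required to reach n from 1 using only calculated values.
--
--     Args:
--         n (int): The goal n.
--
--     Returns:
--         list[int]: The summative steps required.
--     """
--
--     known_values: list[int] = [1]
--     steps = []
--     current = 1
--
--     while current != n:
--         # get the highest known value such that current + x doesn't exceed n
--         k = 0
--         for k in sorted(known_values, reverse=True):
--             if k + current < n:
--                 known_values.append(k + current)
--                 steps.append(k)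
--                 break
--
--         current += k
--
--     return steps + [1]
-- ===== SOURCE B (Python) =====
-- def summative_steps_to_n(n: int) -> list[int]:
--     """
--     Determine the summative (calculative only) steps required to reach n from 1 using only calculated values.
--     """
--     steps = []
--     current = 1
--     while current != n:
--         gap = n - current
--         if gap <= 1:
--             current += 1            # final unit step (gap == 1): not recorded
--         elif 2 * current < n:
--             steps.append(current)   # doubling phase
--             current *= 2
--         else:
--             p = 1                   # largest power of two strictly below gap
--             while p * 2 < gap:
--                 p *= 2
--             steps.append(p)
--             current += p
--     return steps + [1]
-- ===== Notes on version B (the rewrite author's own statement) =====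
-- stated objective: simpler
-- what changed: B drops the known_values list and its sorted descending scan entirely: since the greedy always picks the current value while 2*current < n (doubling) and afterwards the largest power of two strictly below the remaining gap, B keeps only `current` and computes each step arithmetically.
import Mathlib
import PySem

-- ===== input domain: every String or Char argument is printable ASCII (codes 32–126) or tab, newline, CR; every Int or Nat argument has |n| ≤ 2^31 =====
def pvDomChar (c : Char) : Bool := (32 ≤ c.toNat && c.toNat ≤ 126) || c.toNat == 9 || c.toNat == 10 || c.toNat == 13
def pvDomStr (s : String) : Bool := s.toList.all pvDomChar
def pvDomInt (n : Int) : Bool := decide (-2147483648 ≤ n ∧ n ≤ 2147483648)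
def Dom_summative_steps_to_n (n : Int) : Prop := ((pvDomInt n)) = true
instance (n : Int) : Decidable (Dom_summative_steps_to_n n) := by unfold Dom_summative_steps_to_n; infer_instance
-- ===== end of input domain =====

-- B keeps only `current` and computes each greedy step arithmetically (doubling, then the
-- largest power of two below the gap), dropping A's known-values list and its sorted scan.


-- ===== PORT A =====
-- the `for k in sorted(known_values, reverse=True): if k + current < n: … break`:
-- returns (k, true) at the break, else (last element iterated, or the initial k0, false)
def pyForK (current n : Int) : Int → List Int → Int × Bool
  | k0, [] => (k0, false)
  | _, k :: rest => if k + current < n then (k, true) else pyForK current n k rest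

-- `while current != n`; fuel: current grows by ≥ 1 each pass, so n.toNat passes always suffice
def aLoop (n : Int) : Nat → List Int → List Int → Int → List Int
  | 0, _, steps, _ => steps
  | fuel+1, known, steps, current =>
    if current = n then steps
    else
      match pyForK current n 0 (PySem.List.sorted known (fun x => x) true) with
      | (k, true)  => aLoop n fuel (known ++ [k + current]) (steps ++ [k]) (current + k)
      | (k, false) => aLoop n fuel known steps (current + k)

def summative_steps_to_n (n : Int) : List Int := aLoop n n.toNat [1] [] 1 ++ [1]

-- ===== PORT B =====
-- `p = 1; while p * 2 < gap: p *= 2`; fuel: p doubles, so gap.toNat passes always suffice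
def pow2Below (gap : Int) : Nat → Int → Int
  | 0, p => p
  | fuel+1, p => if p * 2 < gap then pow2Below gap fuel (p * 2) else p

-- `while current != n`; same fuel bound as A's loop
def bLoop (n : Int) : Nat → Int → List Int → List Int
  | 0, _, steps => steps
  | fuel+1, current, steps =>
    if current = n then steps
    else
      if n - current ≤ 1 then bLoop n fuel (current + 1) steps
      else if 2 * current < n then bLoop n fuel (2 * current) (steps ++ [current])
      else
        bLoop n fuel (current + pow2Below (n - current) (n - current).toNat 1)
          (steps ++ [pow2Below (n - current) (n - current).toNat 1])

def summative_steps_to_n_alt (n : Int) : List Int := bLoop n n.toNat 1 [] ++ [1]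

-- ===== PRECONDITION & SPEC =====
-- the Python A diverges (never returns) for n ≤ 0; Pre_ excludes exactly those inputs
def Pre_summative_steps_to_n (n : Int) : Prop := 1 ≤ n
instance (n : Int) : Decidable (Pre_summative_steps_to_n n) := by unfold Pre_summative_steps_to_n; infer_instance
def pvWitness_summative_steps_to_n : Int := 7

def Spec_summative_steps_to_n (n : Int) (out : List Int) : Prop := out = summative_steps_to_n_alt n
instance (n : Int) (out : List Int) : Decidable (Spec_summative_steps_to_n n out) := by unfold Spec_summative_steps_to_n; infer_instance

-- ===== CLAIM (what is proved, stated in full; the proofs are below) =====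
def Claim_equal_summative_steps_to_n : Prop := ∀ (n : Int), Dom_summative_steps_to_n n → Pre_summative_steps_to_n n → Spec_summative_steps_to_n n (summative_steps_to_n n)

-- ===== LEMMAS AND PROOFS =====

-- invariant of A's loop state: `known` holds all powers of two up to 2^m (with 2^m ≤ current),
-- every other element is ≥ the remaining gap (hence never eligible), and either the gap is
-- already ≤ 2^m (fill phase) or current is itself 2^m (doubling phase)
def InvK (known : List Int) (current n : Int) : Prop :=
  1 ≤ current ∧ current ≤ n ∧
  ∃ m : Nat,
    (∀ j : Nat, j ≤ m → ((2:Int)^j) ∈ known) ∧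
    (∀ k ∈ known, (1:Int) ≤ k) ∧
    (∀ k ∈ known, (∃ j : Nat, j ≤ m ∧ k = (2:Int)^j) ∨ n - current ≤ k) ∧
    (2:Int)^m ≤ current ∧ (n - current ≤ (2:Int)^m ∨ current = (2:Int)^m)

lemma scan_none (l : List Int) (k0 current n : Int)
    (hp : l.Pairwise (fun a b => b ≤ a)) (h1 : (1:Int) ∈ l)
    (hge : ∀ k ∈ l, (1:Int) ≤ k) (hne : ∀ k ∈ l, ¬ (k + current < n)) :
    pyForK current n k0 l = (1, false) := by
  induction l generalizing k0 with
  | nil => cases h1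
  | cons k rest ih =>
    simp only [pyForK, if_neg (hne k (List.mem_cons_self ..))]
    cases rest with
    | nil =>
      have : k = 1 := (List.mem_singleton.1 h1).symm
      subst this
      simp [pyForK]
    | cons r rs =>
      apply ih
      · exact hp.of_cons
      · rcases List.mem_cons.1 h1 with h | h
        · -- k = 1; head of the tail is sandwiched between 1 and k = 1
        
          have hr1 : (1:Int) ≤ r := hge r (by simp)
          have hrk : r ≤ k := (List.pairwise_cons.1 hp).1 r (by simp)
          have : r = 1 := by omega
          simp [this]
        · exact h
      · exact fun x hx => hge x (List.mem_cons_of_mem _ hx)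
      · exact fun x hx => hne x (List.mem_cons_of_mem _ hx)

lemma scan_some (l : List Int) (k0 current n a : Int)
    (hp : l.Pairwise (fun x y => y ≤ x)) (ha : a ∈ l) (hel : a + current < n)
    (hmax : ∀ k ∈ l, k + current < n → k ≤ a) :
    pyForK current n k0 l = (a, true) := by
  induction l generalizing k0 with
  | nil => cases ha
  | cons k rest ih =>
    by_cases hk : k + current < n
    · have hka : k ≤ a := hmax k (by simp) hk
      have hak : a ≤ k := by
        rcases List.mem_cons.1 ha with h | h
        · omega
        · exact (List.pairwise_cons.1 hp).1 a h
      have : k = a := le_antisymm hka hak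
      subst this
      simp [pyForK, hk]
    · simp only [pyForK, if_neg hk]
      apply ih
      · exact hp.of_cons
      · rcases List.mem_cons.1 ha with h | h
        · exact absurd (h ▸ hel) hk
        · exact h
      · exact fun x hx hx' => hmax x (List.mem_cons_of_mem _ hx) hx'

lemma pow2Below_eq (j : Nat) : ∀ (fuel i : Nat) (gap : Int), i ≤ j → (2:Int)^j < gap →
    gap ≤ (2:Int)^(j+1) → j - i < fuel → pow2Below gap fuel ((2:Int)^i) = (2:Int)^j := by
  intro fuel
  induction fuel with
  | zero => intro i gap _ _ _ h; omega
  | succ s ih =>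
    intro i gap hij hlt hle hfuel
    by_cases hstep : (2:Int)^i * 2 < gap
    · have h2 : (2:Int)^(i+1) < gap := by rw [pow_succ]; exact hstep
      have hij' : i + 1 ≤ j := by
        by_contra hc
        have : j ≤ i := by omega
        have : (2:Int)^j ≤ (2:Int)^i := pow_le_pow_right₀ (by norm_num) this
        have : gap ≤ (2:Int)^(i+1) := le_trans hle (pow_le_pow_right₀ (by norm_num) (by omega))
        omega
      have := ih (i+1) gap hij' hlt hle (by omega)
      simpa [pow2Below, hstep, pow_succ] using this
    · have hij2 : j ≤ i := by
        by_contra hc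
        have h1 : i + 1 ≤ j := by omega
        have : (2:Int)^(i+1) ≤ (2:Int)^j := pow_le_pow_right₀ (by norm_num) h1
        have : (2:Int)^i * 2 < gap := by rw [← pow_succ]; omega
        exact hstep this
      have : i = j := le_antisymm hij hij2
      subst this
      simp [pow2Below, hstep]

lemma two_pow_pos (j : Nat) : (0:Int) < 2^j := pow_pos (by norm_num) j

lemma sim (fuel : Nat) : ∀ (current n : Int) (known steps : List Int), InvK known current n →
    aLoop n fuel known steps current = bLoop n fuel current steps := by
  induction fuel with
  | zero => intro _ _ _ _ _; rfl
  | succ f ih =>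
    intro current n known steps hinv
    obtain ⟨hc1, hcn, m, hpows, hge1, hclass, hmc, hphase⟩ := hinv
    by_cases heq : current = n
    · simp [aLoop, bLoop, heq]
    · have hlt : current < n := lt_of_le_of_ne hcn heq
      have hgap1 : 1 ≤ n - current := by omega
      -- facts about the sorted list
      set srt := PySem.List.sorted known (fun x => x) true with hsrt
      have hpair : srt.Pairwise (fun a b => b ≤ a) := PySem.List.sorted_pairwise_rev known (fun x => x)
      have hmem : ∀ x : Int, x ∈ srt ↔ x ∈ known := fun x => PySem.List.mem_sorted known (fun y => y) true x
      by_cases hsmall : n - current ≤ 1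
      · -- gap = 1: no eligible element, fall through with k = min known = 1
        have hscan : pyForK current n 0 srt = (1, false) := by
          apply scan_none
          · exact hpair
          · exact (hmem 1).2 (by simpa using hpows 0 (Nat.zero_le m))
          · exact fun k hk => hge1 k ((hmem k).1 hk)
          · intro k hk
            have := hge1 k ((hmem k).1 hk)
            omega
        simp only [aLoop, bLoop, if_neg heq, if_pos hsmall, ← hsrt, hscan]
        apply ih
        refine ⟨by omega, by omega, m, hpows, hge1, ?_, by omega, ?_⟩
        · intro k hk
          have := hge1 k hk
          omega
        · left; have := two_pow_pos m; omega
      · have hgap2 : 2 ≤ n - current := by omega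
        by_cases hdbl : 2 * current < n
        · -- doubling phase: current = 2^m and the scan picks current itself
          have hcur : current = (2:Int)^m := by
            rcases hphase with h | h
            · omega
            · exact h
          have hscan : pyForK current n 0 srt = (current, true) := by
            apply scan_some
            · exact hpair
            · exact (hmem current).2 (hcur ▸ hpows m le_rfl)
            · omega
            · intro k hk hk'
              rcases hclass k ((hmem k).1 hk) with ⟨j, hj, rfl⟩ | h
              · exact hcur ▸ pow_le_pow_right₀ (by norm_num) hj
              · omega
          simp only [aLoop, bLoop, if_neg heq, if_neg hsmall, if_pos hdbl, ← hsrt, hscan]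
          have harith : current + current = 2 * current := by ring
          rw [harith]
          apply ih
          refine ⟨by omega, by omega, m + 1, ?_, ?_, ?_, ?_, ?_⟩
          · intro j hj
            rcases Nat.lt_or_ge j (m+1) with h | h
            · exact List.mem_append_left _ (hpows j (by omega))
            · have : j = m + 1 := by omega
              subst this
              apply List.mem_append_right
              simp [pow_succ, hcur]; ring
          · intro k hk
            rcases List.mem_append.1 hk with h | h
            · exact hge1 k h
            · simp at h; omega
          · intro k hk
            rcases List.mem_append.1 hk with h | h
            · rcases hclass k h with ⟨j, hj, rfl⟩ | h'
              · exact Or.inl ⟨j, by omega, rfl⟩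
              · right; omega
            · simp at h
              exact Or.inl ⟨m + 1, le_rfl, by rw [h, pow_succ, hcur]; ring⟩
          · rw [pow_succ, ← hcur]; omega
          · right; rw [pow_succ, ← hcur]; ring
        · -- fill phase: the scan picks the largest power of two below the gap
          have hgapm : n - current ≤ (2:Int)^m := by
            rcases hphase with h | h
            · exact h
            · omega
          set gap := n - current with hgapdef
          set t := (gap - 1).toNat with htdef
          have ht1 : 1 ≤ t := by omega
          set j := Nat.log 2 t with hjdef
          have hjl : (2:Nat)^j ≤ t := Nat.pow_log_le_self 2 (by omega)
          have hju : t < (2:Nat)^(j+1) := Nat.lt_pow_succ_log_self (by norm_num) t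
          have hjlZ : (2:Int)^j < gap := by
            have : ((2:Nat)^j : Int) ≤ (t : Int) := by exact_mod_cast hjl
            push_cast at this
            omega
          have hjuZ : gap ≤ (2:Int)^(j+1) := by
            have : ((t:Int)) < ((2:Nat)^(j+1) : Int) := by exact_mod_cast hju
            push_cast at this
            omega
          have hjm : j ≤ m := by
            by_contra hc
            have : (2:Int)^m ≤ (2:Int)^j := pow_le_pow_right₀ (by norm_num) (by omega)
            omega
          have hscan : pyForK current n 0 srt = ((2:Int)^j, true) := by
            apply scan_some
            · exact hpair
            · exact (hmem _).2 (hpows j hjm)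
            · omega
            · intro k hk hk'
              rcases hclass k ((hmem k).1 hk) with ⟨i, hi, rfl⟩ | h
              · apply pow_le_pow_right₀ (by norm_num)
                by_contra hc
                have : (2:Int)^(j+1) ≤ (2:Int)^i := pow_le_pow_right₀ (by norm_num) (by omega)
                omega
              · omega
          have hp2b : pow2Below gap gap.toNat 1 = (2:Int)^j := by
            have hfuel : j < gap.toNat := by
              have : j < 2^j := Nat.lt_two_pow_self
              have h2 : ((2:Nat)^j : Int) = (2:Int)^j := by push_cast; ring
              omega
            have := pow2Below_eq j gap.toNat 0 gap (Nat.zero_le j) hjlZ hjuZ (by omega)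
            simpa using this
          simp only [aLoop, bLoop, if_neg heq, if_neg hsmall, if_neg hdbl, ← hsrt, hscan,
            ← hgapdef, hp2b]
          apply ih
          refine ⟨by omega, by omega, m, ?_, ?_, ?_, ?_, ?_⟩
          · exact fun i hi => List.mem_append_left _ (hpows i hi)
          · intro k hk
            rcases List.mem_append.1 hk with h | h
            · exact hge1 k h
            · simp at h
              have := two_pow_pos j
              omega
          · intro k hk
            rcases List.mem_append.1 hk with h | h
            · rcases hclass k h with h' | h'
              · exact Or.inl h'
              · right; have := two_pow_pos j; omega
            · simp at h
              right
              have := two_pow_pos j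
              omega
          · have := two_pow_pos j; omega
          · left
            have := two_pow_pos j
            omega

-- ===== VERDICT (by name: the statement is the Claim_ definition above) =====
theorem summative_steps_to_n_spec : Claim_equal_summative_steps_to_n := by
  intro n _ hpre
  unfold Spec_summative_steps_to_n summative_steps_to_n summative_steps_to_n_alt
  have hinv : InvK [1] 1 n := by
    refine ⟨le_rfl, hpre, 0, ?_, ?_, ?_, ?_, ?_⟩
    · intro j hj
      have : j = 0 := by omega
      simp [this]
    · intro k hk; simp at hk; omega
    · intro k hk; simp at hk
      exact Or.inl ⟨0, le_rfl, by simp [hk]⟩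
    · simp
    · right; simp
  rw [sim n.toNat 1 n [1] [] hinv]
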